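-- pv_equiv track=rewrite | github.com/Shilenkovv/Algorithms_PyGen_bg | 9_Reinforcement_of_Material/9_2_3.py | bound_sort
-- ===== SOURCE A (Python) =====
-- def bound_sort(nums: list[int], k: int) -> bool:
--     if k == len(nums) - 1:
--         return True
--     max_elem = max(nums[: k + 1])
--     if nums[k + 1] < max_elem:
--         return False
--     for i in range(k + 2, len(nums)):
--         if nums[i] < nums[i - 1]:
--             return False
--     return True
-- ===== SOURCE B (Python) =====
-- def bound_sort(nums: list[int], k: int) -> bool:
--     if k == len(nums) - 1:
--         return True
--     suffix = nums[k + 1:]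
--     return max(nums[: k + 1]) <= suffix[0] and suffix == sorted(suffix)
-- ===== Notes on version B (the rewrite author's own statement) =====
-- stated objective: simpler
-- what changed: The explicit index loop over range(k+2, len(nums)) that checks adjacent pairs is replaced by slicing the suffix once and comparing it with its sorted copy (suffix == sorted(suffix)), and the pre-pivot check becomes a single max-vs-first-suffix-element comparison.
-- outside the precondition, e.g. on bound_sort([1, 2, 3], -3): A returns False, B returns True
import Mathlib
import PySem

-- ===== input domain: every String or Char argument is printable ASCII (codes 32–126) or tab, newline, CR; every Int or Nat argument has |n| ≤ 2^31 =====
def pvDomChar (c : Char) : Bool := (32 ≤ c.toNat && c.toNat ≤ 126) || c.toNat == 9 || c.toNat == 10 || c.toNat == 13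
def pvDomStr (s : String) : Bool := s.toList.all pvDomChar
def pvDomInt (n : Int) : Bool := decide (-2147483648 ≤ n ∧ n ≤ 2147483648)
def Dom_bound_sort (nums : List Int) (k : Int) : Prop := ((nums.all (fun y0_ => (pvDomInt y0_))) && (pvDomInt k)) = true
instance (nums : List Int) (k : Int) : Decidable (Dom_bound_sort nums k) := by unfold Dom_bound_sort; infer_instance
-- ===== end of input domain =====

-- B replaces A's explicit pairwise index loop over the suffix by a slice-and-compare
-- sortedness test (suffix == sorted(suffix)); objective: simpler.

-- ===== PORT A =====
def bound_sort (nums : List Int) (k : Int) : Bool :=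
  if k = (nums.length : Int) - 1 then true
  else
    match PySem.List.max? (PySem.List.slice nums none (some (k + 1))) (fun x => x) with
    | none => false  -- max([]) raises ValueError; outside Pre_
    | some maxElem =>
      if PySem.List.pyGetD nums (k + 1) 0 < maxElem then false
      else
        (PySem.List.pyRange (k + 2) nums.length 1).all
          (fun i => !(PySem.List.pyGetD nums i 0 < PySem.List.pyGetD nums (i - 1) 0))

-- ===== PORT B =====
def bound_sort_alt (nums : List Int) (k : Int) : Bool :=
  if k = (nums.length : Int) - 1 then true
  else
    let suffix := PySem.List.slice nums (some (k + 1)) none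
    match PySem.List.max? (PySem.List.slice nums none (some (k + 1))) (fun x => x) with
    | none => false  -- max([]) raises ValueError; outside Pre_
    | some m =>
      decide (m ≤ PySem.List.pyGetD suffix 0 0) &&
        (suffix == PySem.List.sorted suffix (fun x => x) false)

-- ===== PRECONDITION & SPEC =====
-- Pre_ restricts to the natural index domain 0 ≤ k < len(nums) (plus the trivial
-- empty-list guard case k = -1, nums = []): for other negative k A returns values
-- produced by Python's negative-index wraparound in its loop, and for k ≥ len(nums)
-- (nonempty nums) A raises IndexError.
def Pre_bound_sort (nums : List Int) (k : Int) : Prop :=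
  (0 ≤ k ∧ k < (nums.length : Int)) ∨ (nums = [] ∧ k = -1)
instance (nums : List Int) (k : Int) : Decidable (Pre_bound_sort nums k) := by
  unfold Pre_bound_sort; infer_instance
def pvWitness_bound_sort : List Int × Int := ([3, 1, 4], 1)
def Spec_bound_sort (nums : List Int) (k : Int) (out : Bool) : Prop := out = bound_sort_alt nums k
instance (nums : List Int) (k : Int) (out : Bool) : Decidable (Spec_bound_sort nums k out) := by
  unfold Spec_bound_sort; infer_instance

-- ===== CLAIM (what is proved, stated in full; the proofs are below) =====
def Claim_equal_bound_sort : Prop := ∀ (nums : List Int) (k : Int), Dom_bound_sort nums k → Pre_bound_sort nums k → Spec_bound_sort nums k (bound_sort nums k)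

-- ===== LEMMAS AND PROOFS =====

-- A's pairwise loop over range(k+2, len) succeeds iff the suffix drop (k+1) nums is sorted.
theorem loop_iff (nums : List Int) (kn : Nat) (h : kn + 1 < nums.length) :
    (((PySem.List.pyRange ((kn : Int) + 2) nums.length 1).all
       (fun i => !(PySem.List.pyGetD nums i 0 < PySem.List.pyGetD nums (i - 1) 0))) = true)
      ↔ (nums.drop (kn + 1)).Pairwise (· ≤ ·) := by
  rw [List.all_eq_true, ← List.isChain_iff_pairwise, List.isChain_iff_getElem]
  constructor
  · intro H j hj
    have hj' : j + 1 < nums.length - (kn + 1) := by simpa using hj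
    have hmem : (((kn + 2 + j : Nat) : Int)) ∈ PySem.List.pyRange ((kn : Int) + 2) nums.length 1 := by
      rw [PySem.List.mem_pyRange_one]; push_cast; omega
    have hcond := H _ hmem
    have hsub : (((kn + 2 + j : Nat) : Int)) - 1 = (((kn + 1 + j : Nat) : Int)) := by push_cast; ring
    rw [hsub] at hcond
    simp only [PySem.List.pyGetD_natCast, Bool.not_eq_eq_eq_not, Bool.not_true, decide_eq_false_iff_not, not_lt] at hcond
    have e1 : (nums.drop (kn + 1))[j] = nums.getD (kn + 1 + j) 0 := by
      rw [List.getElem_drop, List.getD_eq_getElem]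
    have e2 : (nums.drop (kn + 1))[j + 1]'(by simpa using hj) = nums.getD (kn + 2 + j) 0 := by
      rw [List.getElem_drop, List.getD_eq_getElem (hn := by omega)]
      congr 1; omega
    rw [e1, e2]; exact hcond
  · intro H i hi
    rw [PySem.List.mem_pyRange_one] at hi
    obtain ⟨j, rfl⟩ : ∃ j : Nat, i = ((kn + 2 + j : Nat) : Int) :=
      ⟨(i - ((kn : Int) + 2)).toNat, by push_cast; omega⟩
    have hjlen : kn + 2 + j < nums.length := by
      have := hi.2; push_cast at this; omega
    have hsub : (((kn + 2 + j : Nat) : Int)) - 1 = (((kn + 1 + j : Nat) : Int)) := by push_cast; ring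
    rw [hsub]
    simp only [PySem.List.pyGetD_natCast, Bool.not_eq_eq_eq_not, Bool.not_true, decide_eq_false_iff_not, not_lt]
    have hj' : j + 1 < (nums.drop (kn + 1)).length := by simp; omega
    have hcond := H j hj'
    have e1 : (nums.drop (kn + 1))[j]'(by simp; omega) = nums.getD (kn + 1 + j) 0 := by
      rw [List.getElem_drop, List.getD_eq_getElem]
    have e2 : (nums.drop (kn + 1))[j + 1]'hj' = nums.getD (kn + 2 + j) 0 := by
      rw [List.getElem_drop, List.getD_eq_getElem (hn := by omega)]
      congr 1; omega
    rw [e1, e2] at hcond; exact hcond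

-- ===== VERDICT (by name: the statement is the Claim_ definition above) =====
theorem bound_sort_spec : Claim_equal_bound_sort := by
  unfold Claim_equal_bound_sort Spec_bound_sort
  intro nums k _ hpre
  unfold bound_sort bound_sort_alt
  by_cases hk : k = (nums.length : Int) - 1
  · simp [hk]
  · simp only [if_neg hk]
    rcases hpre with ⟨hk0, hklen⟩ | ⟨hnil, hkm1⟩
    swap
    · exact absurd (by subst hnil hkm1; simp) hk
    obtain ⟨kn, rfl⟩ : ∃ n : Nat, k = (n : Int) := ⟨k.toNat, (Int.toNat_of_nonneg hk0).symm⟩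
    have hlt : kn + 1 < nums.length := by
      by_contra hcon; exact hk (by omega)
    have hcast : ((kn : Int) + 1) = ((kn + 1 : Nat) : Int) := by push_cast; ring
    have hpref : PySem.List.slice nums none (some ((kn : Int) + 1)) = nums.take (kn + 1) := by
      rw [hcast, PySem.List.slice_to_natCast]
    have hsuf : PySem.List.slice nums (some ((kn : Int) + 1)) none = nums.drop (kn + 1) := by
      rw [hcast, PySem.List.slice_from_natCast]
    have hne : nums.take (kn + 1) ≠ [] := by
      intro hnil
      rcases List.take_eq_nil_iff.mp hnil with h | h
      · omega
      · subst h; simp at hlt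
    obtain ⟨m, hm⟩ : ∃ m, PySem.List.max? (nums.take (kn + 1)) (fun x => x) = some m := by
      cases hcase : PySem.List.max? (nums.take (kn + 1)) (fun x => x)
      · exact absurd ((PySem.List.max?_eq_none_iff _ _).mp hcase) hne
      · exact ⟨_, rfl⟩
    simp only [hpref, hsuf, hm]
    have hget : PySem.List.pyGetD nums ((kn : Int) + 1) 0 = nums.getD (kn + 1) 0 := by
      rw [hcast, PySem.List.pyGetD_natCast]
    have hget2 : PySem.List.pyGetD (nums.drop (kn + 1)) 0 0 = nums.getD (kn + 1) 0 := by
      rw [PySem.List.pyGetD_zero, List.getD_eq_getElem (hn := by simp; omega),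
          List.getD_eq_getElem (hn := hlt), List.getElem_drop]
    simp only [hget, hget2]
    by_cases hcmp : nums.getD (kn + 1) 0 < m
    · have h1 : ¬ m ≤ nums.getD (kn + 1) 0 := not_le.mpr hcmp
      simp only [List.getD_eq_getElem?_getD] at hcmp h1
      simp [hcmp, h1]
    · rw [if_neg hcmp, decide_eq_true (not_lt.mp hcmp), Bool.true_and]
      have hL := loop_iff nums kn hlt
      have hS : ((nums.drop (kn + 1)) == PySem.List.sorted (nums.drop (kn + 1)) (fun x => x) false) = true
          ↔ (nums.drop (kn + 1)).Pairwise (· ≤ ·) := by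
        rw [beq_iff_eq]
        constructor
        · intro he
          have hp := PySem.List.sorted_pairwise (nums.drop (kn + 1)) (fun x => x)
          rw [← he] at hp; simpa using hp
        · intro hp
          exact (PySem.List.sorted_eq_self_of_pairwise _ (fun x => x) (by simpa using hp)).symm
      rw [Bool.eq_iff_iff, hL, hS]
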